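-- pv_equiv track=rewrite | github.com/CorwynRavenwing/classes | python/hackerrank/algorithms/tower_breakers.py | reachable_games
-- ===== SOURCE A (Python) =====
-- def reachable_games(G):
--     answer = [
--         sorted(G[:column] + tuple([new_val]) + G[column+1:])
--         for column in range(len(G))
--         for new_val in range(G[column])
--     ]
--     # answer = [
--     #     tuple([
--     #         c
--     #         for c in game
--     #         if c != 0
--     #     ])
--     #     for game in answer
--     # ]
--     answer = [
--         tuple(game)
--         for game in answer
--     ]
--     return answer
-- ===== SOURCE B (Python) =====
-- def reachable_games(G):
--     # per column: sort the fixed base once, then insert each new_val at its position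
--     out = []
--     for column in range(len(G)):
--         rest = sorted(G[:column] + G[column + 1:])
--         for new_val in range(G[column]):
--             i = 0
--             while i < len(rest) and rest[i] < new_val:
--                 i += 1
--             out.append(tuple(rest[:i] + [new_val] + rest[i:]))
--     return out
-- ===== Notes on version B (the rewrite author's own statement) =====
-- stated objective: alternative
-- what changed: Instead of fully re-sorting the whole game for every (column, new_val) pair, B sorts each column's fixed base once and places each new_val by a single insertion scan into that pre-sorted base.
import Mathlib
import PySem

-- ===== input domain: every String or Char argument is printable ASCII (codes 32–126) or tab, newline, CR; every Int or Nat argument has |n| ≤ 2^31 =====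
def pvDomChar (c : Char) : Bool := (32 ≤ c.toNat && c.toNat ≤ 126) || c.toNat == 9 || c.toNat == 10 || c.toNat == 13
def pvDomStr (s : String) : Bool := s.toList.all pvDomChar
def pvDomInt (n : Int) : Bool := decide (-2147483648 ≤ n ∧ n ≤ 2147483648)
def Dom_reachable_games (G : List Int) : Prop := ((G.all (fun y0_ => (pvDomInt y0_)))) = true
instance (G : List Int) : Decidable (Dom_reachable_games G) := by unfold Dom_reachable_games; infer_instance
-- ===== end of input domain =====

-- B sorts each column's fixed base once and inserts every new_val by a linear scan,
-- instead of A's full sort per generated game (an alternative decomposition of the same task).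

-- ===== PORT A =====
-- [sorted(G[:c] + (v,) + G[c+1:]) for c in range(len(G)) for v in range(G[c])], then map tuple
def reachable_games (G : List Int) : List (List Int) :=
  (((PySem.List.pyRange 0 (G.length : Int) 1).flatMap (fun column =>
      (PySem.List.pyRange 0 (PySem.List.pyGetD G column 0) 1).map (fun new_val =>
        PySem.List.sorted
          (PySem.List.slice G none (some column) ++ [new_val]
            ++ PySem.List.slice G (some (column + 1)) none)
          (fun x => x) false))).map (fun game => game))

-- ===== PORT B =====
-- the while loop 'i = 0; while i < len(rest) and rest[i] < new_val: i += 1'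
def scanPos (v : Int) : List Int → Nat
  | [] => 0
  | x :: xs => if x < v then scanPos v xs + 1 else 0

def reachable_games_alt (G : List Int) : List (List Int) :=
  (PySem.List.pyRange 0 (G.length : Int) 1).foldl (fun out column =>
    let rest := PySem.List.sorted
        (PySem.List.slice G none (some column) ++ PySem.List.slice G (some (column + 1)) none)
        (fun x => x) false
    (PySem.List.pyRange 0 (PySem.List.pyGetD G column 0) 1).foldl (fun out new_val =>
      let i := scanPos new_val rest
      out ++ [rest.take i ++ [new_val] ++ rest.drop i]) out) []

-- ===== PRECONDITION & SPEC =====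
def Spec_reachable_games (G : List Int) (out : List (List Int)) : Prop := out = reachable_games_alt G
instance (G : List Int) (out : List (List Int)) : Decidable (Spec_reachable_games G out) := by unfold Spec_reachable_games; infer_instance

-- ===== CLAIM (what is proved, stated in full; the proofs are below) =====
def Claim_equal_reachable_games : Prop := ∀ (G : List Int), Dom_reachable_games G → Spec_reachable_games G (reachable_games G)

-- ===== LEMMAS AND PROOFS =====

-- inserting v at index i is a permutation of consing it
theorem insAt_perm (v : Int) (l : List Int) (i : Nat) :
    (l.take i ++ [v] ++ l.drop i).Perm (v :: l) := by
  have h := @List.perm_middle _ v (l.take i) (l.drop i)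
  rw [List.take_append_drop] at h
  simpa [List.append_assoc] using h

-- inserting v at scanPos keeps a ≤-sorted list ≤-sorted
theorem insAt_pairwise (v : Int) :
    ∀ l : List Int, l.Pairwise (· ≤ ·) →
      (l.take (scanPos v l) ++ [v] ++ l.drop (scanPos v l)).Pairwise (· ≤ ·) := by
  intro l
  induction l with
  | nil => intro _; simp [scanPos]
  | cons x xs ih =>
    intro h
    rcases List.pairwise_cons.mp h with ⟨hx, hxs⟩
    by_cases hlt : x < v
    · have ihp := ih hxs
      simp only [scanPos, hlt, if_pos, List.take_succ_cons, List.drop_succ_cons,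
        List.cons_append]
      refine List.pairwise_cons.mpr ⟨?_, ihp⟩
      intro y hy
      have hy' : y ∈ v :: xs :=
        (insAt_perm v xs (scanPos v xs)).mem_iff.mp (by simpa using hy)
      rcases List.mem_cons.mp hy' with rfl | hy''
      · exact le_of_lt hlt
      · exact hx y hy''
    · have hvx : v ≤ x := le_of_not_gt hlt
      simp only [scanPos, hlt, if_neg, not_false_iff, List.take_zero, List.drop_zero,
        List.nil_append, List.cons_append]
      refine List.pairwise_cons.mpr ⟨?_, h⟩
      intro y hy
      rcases List.mem_cons.mp hy with rfl | hy'
      · exact hvx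
      · exact le_trans hvx (hx y hy')

-- the per-game equality: A's fresh sort equals B's insertion into the sorted base
theorem row_eq (pre suf : List Int) (v : Int) :
    PySem.List.sorted (pre ++ [v] ++ suf) (fun x => x) false =
      (let rest := PySem.List.sorted (pre ++ suf) (fun x => x) false
       rest.take (scanPos v rest) ++ [v] ++ rest.drop (scanPos v rest)) := by
  set rest := PySem.List.sorted (pre ++ suf) (fun x => x) false with hrest
  apply PySem.List.sorted_id_eq_of_perm_of_pairwise
  · have h2 : (v :: (pre ++ suf)).Perm (pre ++ [v] ++ suf) := by
      simpa [List.append_assoc] using (@List.perm_middle _ v pre suf).symm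
    have h1 : rest.Perm (pre ++ suf) := PySem.List.sorted_perm (pre ++ suf) (fun x => x) false
    exact ((insAt_perm v rest _).trans (List.Perm.cons v h1)).trans h2
  · have hp := PySem.List.sorted_pairwise (pre ++ suf) (fun x => x)
    exact insAt_pairwise v rest (by simpa [hrest] using hp)

-- ===== VERDICT (by name: the statement is the Claim_ definition above) =====
theorem reachable_games_spec : Claim_equal_reachable_games := by
  intro G _
  unfold Spec_reachable_games reachable_games reachable_games_alt
  simp only [PySem.List.foldl_append_singleton_eq_map, PySem.List.foldl_append_eq_flatMap,
    List.nil_append, List.map_id']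
  congr 1
  funext column
  congr 1
  funext new_val
  exact row_eq _ _ new_val
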